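-- pv_equiv track=rewrite | github.com/pypi-data/pypi-mirror-401 | packages/ospac/ospac-1.2.5.tar.gz/ospac-1.2.5/ospac/core/compatibility_matrix.py | _categorize_licenses
-- ===== SOURCE A (Python) =====
-- from typing import Dict, List, Optional, Tuple, Set
--
-- def _categorize_licenses(license_ids: List[str]) -> Dict[str, List[str]]:
--     """Categorize licenses by family/type for efficient storage."""
--     categories = {
--         "gpl": [],
--         "lgpl": [],
--         "agpl": [],
--         "bsd": [],
--         "mit": [],
--         "apache": [],
--         "cc": [],
--         "public_domain": [],
--         "proprietary": [],
--         "other": []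
--     }
--
--     for license_id in license_ids:
--         lid_lower = license_id.lower()
--
--         if "gpl-" in lid_lower and "lgpl" not in lid_lower and "agpl" not in lid_lower:
--             categories["gpl"].append(license_id)
--         elif "lgpl" in lid_lower:
--             categories["lgpl"].append(license_id)
--         elif "agpl" in lid_lower:
--             categories["agpl"].append(license_id)
--         elif "bsd" in lid_lower:
--             categories["bsd"].append(license_id)
--         elif "mit" in lid_lower:
--             categories["mit"].append(license_id)
--         elif "apache" in lid_lower:
--             categories["apache"].append(license_id)
--         elif lid_lower.startswith("cc"):
--             categories["cc"].append(license_id)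
--         elif "public" in lid_lower or "unlicense" in lid_lower or lid_lower == "0bsd":
--             categories["public_domain"].append(license_id)
--         elif any(prop in lid_lower for prop in ["proprietary", "commercial", "elastic"]):
--             categories["proprietary"].append(license_id)
--         else:
--             categories["other"].append(license_id)
--
--     # Remove empty categories
--     return {k: v for k, v in categories.items() if v}
-- ===== SOURCE B (Python) =====
-- # B: data-driven first-match rule table; categories computed once per id, then one cheap pass per category
-- CATEGORY_RULES = [
--     ("gpl", lambda l: "gpl-" in l and "lgpl" not in l and "agpl" not in l),
--     ("lgpl", lambda l: "lgpl" in l),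
--     ("agpl", lambda l: "agpl" in l),
--     ("bsd", lambda l: "bsd" in l),
--     ("mit", lambda l: "mit" in l),
--     ("apache", lambda l: "apache" in l),
--     ("cc", lambda l: l.startswith("cc")),
--     ("public_domain", lambda l: "public" in l or "unlicense" in l or l == "0bsd"),
--     ("proprietary", lambda l: any(p in l for p in ("proprietary", "commercial", "elastic"))),
--     ("other", lambda l: True),
-- ]
--
-- def _category(license_id):
--     low = license_id.lower()
--     return next(name for name, pred in CATEGORY_RULES if pred(low))
--
-- def _categorize_licenses(license_ids):
--     names = [_category(lid) for lid in license_ids]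
--     result = {}
--     for cat, _ in CATEGORY_RULES:
--         bucket = [lid for lid, name in zip(license_ids, names) if name == cat]
--         if bucket:
--             result[cat] = bucket
--     return result
-- ===== Notes on version B (the rewrite author's own statement) =====
-- stated objective: alternative
-- what changed: Replaces A's in-loop if/elif dispatch that mutates a preinitialised category dict with a declarative ordered (name, predicate) rule table: a first-match category function plus one filter pass per category, collecting nonempty buckets in fixed category order.
import Mathlib
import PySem

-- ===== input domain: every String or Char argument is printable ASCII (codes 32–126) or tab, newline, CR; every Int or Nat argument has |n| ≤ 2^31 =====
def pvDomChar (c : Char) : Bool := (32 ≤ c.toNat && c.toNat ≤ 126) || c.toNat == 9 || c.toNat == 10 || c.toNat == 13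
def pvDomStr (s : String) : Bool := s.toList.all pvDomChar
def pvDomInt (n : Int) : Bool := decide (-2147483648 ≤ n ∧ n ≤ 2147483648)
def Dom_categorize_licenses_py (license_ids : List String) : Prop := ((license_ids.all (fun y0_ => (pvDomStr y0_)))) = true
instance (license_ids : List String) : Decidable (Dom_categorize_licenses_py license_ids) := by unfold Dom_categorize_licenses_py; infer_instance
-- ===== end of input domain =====

-- B replaces A's in-loop if/elif dispatch into a mutable dict by a data-driven first-match rule
-- table and one filter pass per category (alternative decomposition; same asymptotic cost).

-- ===== PORT A =====
-- A's loop body (the if/elif chain appending license_id to one bucket of the dict)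
def pvStepA (cats : PySem.Dict String (List String)) (license_id : String) : PySem.Dict String (List String) :=
  let lid_lower := PySem.Str.lower license_id
  if PySem.Str.isIn "gpl-" lid_lower && !PySem.Str.isIn "lgpl" lid_lower && !PySem.Str.isIn "agpl" lid_lower then cats.modify "gpl" [] (· ++ [license_id])
  else if PySem.Str.isIn "lgpl" lid_lower then cats.modify "lgpl" [] (· ++ [license_id])
  else if PySem.Str.isIn "agpl" lid_lower then cats.modify "agpl" [] (· ++ [license_id])
  else if PySem.Str.isIn "bsd" lid_lower then cats.modify "bsd" [] (· ++ [license_id])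
  else if PySem.Str.isIn "mit" lid_lower then cats.modify "mit" [] (· ++ [license_id])
  else if PySem.Str.isIn "apache" lid_lower then cats.modify "apache" [] (· ++ [license_id])
  else if PySem.Str.startswith lid_lower "cc" then cats.modify "cc" [] (· ++ [license_id])
  else if PySem.Str.isIn "public" lid_lower || PySem.Str.isIn "unlicense" lid_lower || lid_lower == "0bsd" then cats.modify "public_domain" [] (· ++ [license_id])
  else if (["proprietary", "commercial", "elastic"].any (fun prop => PySem.Str.isIn prop lid_lower)) then cats.modify "proprietary" [] (· ++ [license_id])
  else cats.modify "other" [] (· ++ [license_id])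

def categorize_licenses_py (license_ids : List String) : List (String × List String) :=
  let categories : PySem.Dict String (List String) :=
    PySem.Dict.ofList [("gpl", []), ("lgpl", []), ("agpl", []), ("bsd", []), ("mit", []), ("apache", []), ("cc", []), ("public_domain", []), ("proprietary", []), ("other", [])]
  let categories := license_ids.foldl pvStepA categories
  categories.items.filter (fun p => !p.2.isEmpty)

-- ===== PORT B =====
-- the ordered rule table CATEGORY_RULES of Source B
def pvRules : List (String × (String → Bool)) :=
  [("gpl", fun l => PySem.Str.isIn "gpl-" l && !PySem.Str.isIn "lgpl" l && !PySem.Str.isIn "agpl" l),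
   ("lgpl", fun l => PySem.Str.isIn "lgpl" l),
   ("agpl", fun l => PySem.Str.isIn "agpl" l),
   ("bsd", fun l => PySem.Str.isIn "bsd" l),
   ("mit", fun l => PySem.Str.isIn "mit" l),
   ("apache", fun l => PySem.Str.isIn "apache" l),
   ("cc", fun l => PySem.Str.startswith l "cc"),
   ("public_domain", fun l => PySem.Str.isIn "public" l || PySem.Str.isIn "unlicense" l || l == "0bsd"),
   ("proprietary", fun l => ["proprietary", "commercial", "elastic"].any (fun p => PySem.Str.isIn p l)),
   ("other", fun _ => true)]

-- _category of Source B: name of the first rule whose predicate holds on the lower-cased id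
-- (the "other" fallback of getD is unreachable: the last rule is always true)
def pvCategory (license_id : String) : String :=
  let low := PySem.Str.lower license_id
  ((pvRules.find? (fun r => r.2 low)).map Prod.fst).getD "other"

def categorize_licenses_py_alt (license_ids : List String) : List (String × List String) :=
  let names := license_ids.map pvCategory
  pvRules.foldl (fun result r =>
    let bucket := ((license_ids.zip names).filter (fun p => p.2 == r.1)).map Prod.fst
    if bucket.isEmpty then result else result ++ [(r.1, bucket)]) []

-- ===== PRECONDITION & SPEC =====
def Spec_categorize_licenses_py (license_ids : List String) (out : List (String × List String)) : Prop := out = categorize_licenses_py_alt license_ids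
instance (license_ids : List String) (out : List (String × List String)) : Decidable (Spec_categorize_licenses_py license_ids out) := by unfold Spec_categorize_licenses_py; infer_instance

-- ===== CLAIM (what is proved, stated in full; the proofs are below) =====
def Claim_equal_categorize_licenses_py : Prop := ∀ (license_ids : List String), Dom_categorize_licenses_py license_ids → Spec_categorize_licenses_py license_ids (categorize_licenses_py license_ids)

-- ===== LEMMAS AND PROOFS =====

-- B's first-match selection, written as A's if/elif chain
theorem pvCategory_eq (x : String) : pvCategory x =
  if  PySem.Str.isIn "gpl-" (PySem.Str.lower x) && !PySem.Str.isIn "lgpl" (PySem.Str.lower x) && !PySem.Str.isIn "agpl" (PySem.Str.lower x) then "gpl"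
  else if PySem.Str.isIn "lgpl" (PySem.Str.lower x) then "lgpl"
  else if PySem.Str.isIn "agpl" (PySem.Str.lower x) then "agpl"
  else if PySem.Str.isIn "bsd" (PySem.Str.lower x) then "bsd"
  else if PySem.Str.isIn "mit" (PySem.Str.lower x) then "mit"
  else if PySem.Str.isIn "apache" (PySem.Str.lower x) then "apache"
  else if PySem.Str.startswith (PySem.Str.lower x) "cc" then "cc"
  else if PySem.Str.isIn "public" (PySem.Str.lower x) || PySem.Str.isIn "unlicense" (PySem.Str.lower x) || (PySem.Str.lower x) == "0bsd" then "public_domain"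
  else if (["proprietary", "commercial", "elastic"].any (fun prop => PySem.Str.isIn prop (PySem.Str.lower x))) then "proprietary"
  else "other" := by
  simp only [pvCategory, pvRules]
  split_ifs with h1 h2 h3 h4 h5 h6 h7 h8 h9 <;>
    simp_all only [List.find?, Option.map, Option.getD, Bool.not_eq_true]

-- pvCategory always lands in one of the ten fixed names
theorem pvCategory_mem (x : String) :
    pvCategory x ∈ ["gpl", "lgpl", "agpl", "bsd", "mit", "apache", "cc", "public_domain", "proprietary", "other"] := by
  rw [pvCategory_eq]
  split_ifs <;> simp

-- A's loop body is the modify at B's selected category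
theorem pvStepA_eq (cats : PySem.Dict String (List String)) (x : String) :
    pvStepA cats x = cats.modify (pvCategory x) [] (· ++ [x]) := by
  rw [pvCategory_eq]
  simp only [pvStepA]
  split_ifs <;> rfl

-- modifying the literal ten-key dict at a key among the ten appends x to exactly that bucket
theorem pvModify_lit (k x : String)
    (hk : k ∈ ["gpl", "lgpl", "agpl", "bsd", "mit", "apache", "cc", "public_domain", "proprietary", "other"])
    (v1 v2 v3 v4 v5 v6 v7 v8 v9 v10 : List String) :
    (PySem.Dict.mk [("gpl", v1), ("lgpl", v2), ("agpl", v3), ("bsd", v4), ("mit", v5), ("apache", v6), ("cc", v7), ("public_domain", v8), ("proprietary", v9), ("other", v10)]).modify k [] (· ++ [x])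
    = PySem.Dict.mk [("gpl", v1 ++ (if k == "gpl" then [x] else [])), ("lgpl", v2 ++ (if k == "lgpl" then [x] else [])), ("agpl", v3 ++ (if k == "agpl" then [x] else [])), ("bsd", v4 ++ (if k == "bsd" then [x] else [])), ("mit", v5 ++ (if k == "mit" then [x] else [])), ("apache", v6 ++ (if k == "apache" then [x] else [])), ("cc", v7 ++ (if k == "cc" then [x] else [])), ("public_domain", v8 ++ (if k == "public_domain" then [x] else [])), ("proprietary", v9 ++ (if k == "proprietary" then [x] else [])), ("other", v10 ++ (if k == "other" then [x] else []))] := by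
  fin_cases hk <;>
    simp [PySem.Dict.modify, PySem.Dict.insert, PySem.Dict.getD, PySem.Dict.get?,
      PySem.Dict.contains, List.find?]

-- reassociating one appended element into the front of a filtered tail
theorem pvBucket (v f : List String) (c : Bool) (x : String) :
    (v ++ if c then [x] else []) ++ f = v ++ if c then x :: f else f := by
  cases c <;> simp

-- the modify loop, started from the literal ten-key dict, just filters into each bucket
theorem pvFold_eq (xs : List String) (v1 v2 v3 v4 v5 v6 v7 v8 v9 v10 : List String) :
    List.foldl (fun d x => d.modify (pvCategory x) [] (· ++ [x]))
      (PySem.Dict.mk [("gpl", v1), ("lgpl", v2), ("agpl", v3), ("bsd", v4), ("mit", v5), ("apache", v6), ("cc", v7), ("public_domain", v8), ("proprietary", v9), ("other", v10)]) xs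
    = PySem.Dict.mk [("gpl", v1 ++ xs.filter (fun x => pvCategory x == "gpl")), ("lgpl", v2 ++ xs.filter (fun x => pvCategory x == "lgpl")), ("agpl", v3 ++ xs.filter (fun x => pvCategory x == "agpl")), ("bsd", v4 ++ xs.filter (fun x => pvCategory x == "bsd")), ("mit", v5 ++ xs.filter (fun x => pvCategory x == "mit")), ("apache", v6 ++ xs.filter (fun x => pvCategory x == "apache")), ("cc", v7 ++ xs.filter (fun x => pvCategory x == "cc")), ("public_domain", v8 ++ xs.filter (fun x => pvCategory x == "public_domain")), ("proprietary", v9 ++ xs.filter (fun x => pvCategory x == "proprietary")), ("other", v10 ++ xs.filter (fun x => pvCategory x == "other"))] := by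
  induction xs generalizing v1 v2 v3 v4 v5 v6 v7 v8 v9 v10 with
  | nil => simp
  | cons x xs ih =>
    rw [List.foldl_cons, pvModify_lit (pvCategory x) x (pvCategory_mem x), ih]
    simp only [List.filter_cons, pvBucket]

-- B's zip-with-precomputed-names bucket is the direct filter by category
theorem pvZip_eq (xs : List String) (k : String) :
    ((xs.zip (xs.map pvCategory)).filter (fun p => p.2 == k)).map Prod.fst
    = xs.filter (fun x => pvCategory x == k) := by
  induction xs with
  | nil => simp
  | cons x xs ih =>
    simp only [List.map_cons, List.zip_cons_cons, List.filter_cons]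
    split_ifs <;> simp_all

-- B's fold over any rule list collects the nonempty buckets in rule order
theorem pvFoldB_eq (license_ids : List String) (rs : List (String × (String → Bool)))
    (acc : List (String × List String)) :
    List.foldl (fun result r =>
      let bucket := List.filter (fun lid => pvCategory lid == r.1) license_ids
      if bucket.isEmpty then result else result ++ [(r.1, bucket)]) acc rs
    = acc ++ (rs.map (fun r => (r.1, List.filter (fun lid => pvCategory lid == r.1) license_ids))).filter
        (fun p => !p.2.isEmpty) := by
  induction rs generalizing acc with
  | nil => simp
  | cons r rs ih =>
    rw [List.foldl_cons]
    simp only [List.map_cons, List.filter_cons]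
    split_ifs with h <;> rw [ih] <;> simp_all

-- ===== VERDICT (by name: the statement is the Claim_ definition above) =====
theorem categorize_licenses_py_spec : Claim_equal_categorize_licenses_py := by
  intro license_ids _
  show categorize_licenses_py license_ids = categorize_licenses_py_alt license_ids
  simp only [categorize_licenses_py, categorize_licenses_py_alt]
  rw [show PySem.Dict.ofList [("gpl", []), ("lgpl", []), ("agpl", []), ("bsd", []), ("mit", []), ("apache", []), ("cc", []), ("public_domain", []), ("proprietary", []), ("other", [])]
      = PySem.Dict.mk [("gpl", []), ("lgpl", []), ("agpl", []), ("bsd", []), ("mit", []), ("apache", []), ("cc", []), ("public_domain", []), ("proprietary", []), ("other", [])] from by decide]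
  rw [show pvStepA = (fun d x => d.modify (pvCategory x) [] (· ++ [x])) from
    funext fun cats => funext fun x => pvStepA_eq cats x]
  rw [show (fun (result : List (String × List String)) (r : String × (String → Bool)) =>
      let bucket := ((license_ids.zip (license_ids.map pvCategory)).filter (fun p => p.2 == r.1)).map Prod.fst
      if bucket.isEmpty then result else result ++ [(r.1, bucket)])
      = (fun result r =>
      let bucket := List.filter (fun lid => pvCategory lid == r.1) license_ids
      if bucket.isEmpty then result else result ++ [(r.1, bucket)]) from
    funext fun result => funext fun r => by simp only [pvZip_eq]]
  rw [pvFold_eq, pvFoldB_eq]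
  simp [pvRules]
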